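-- pv_equiv track=rewrite | github.com/matt-j-harvey/Population_Analysis | Tensor_Component_Analysis/Analyse_Only_Transition.py | get_trial_type_labels
-- ===== SOURCE A (Python) =====
-- def get_trial_type_labels(all_onsets, stable_odour_vis_1_onsets, stable_visual_vis_1_onsets, perfect_transition_vis_1_onsets, imperfect_transition_vis_1_onsets):
--
--     # Create Label List
--     stable_odour_1_indexes = []
--     perfect_transition_indexes = []
--     imperfect_transition_indexes = []
--     stable_visual_1_indexes = []
--
--     number_of_onsets = len(all_onsets)
--     for onset_index in range(number_of_onsets):
--         onset = all_onsets[onset_index]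
--
--         if onset in stable_odour_vis_1_onsets:
--             stable_odour_1_indexes.append(onset_index)
--
--         if onset in perfect_transition_vis_1_onsets:
--             perfect_transition_indexes.append(onset_index)
--
--         if onset in imperfect_transition_vis_1_onsets:
--             imperfect_transition_indexes.append(onset_index)
--
--         if onset in stable_visual_vis_1_onsets:
--             stable_visual_1_indexes.append(onset_index)
--
--     return stable_odour_1_indexes, perfect_transition_indexes, imperfect_transition_indexes, stable_visual_1_indexes
-- ===== SOURCE B (Python) =====
-- def get_trial_type_labels(all_onsets, stable_odour_vis_1_onsets, stable_visual_vis_1_onsets, perfect_transition_vis_1_onsets, imperfect_transition_vis_1_onsets):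
--     # Inverted index: onset value -> list of positions where it occurs, built once.
--     positions = {}
--     for index, onset in enumerate(all_onsets):
--         positions.setdefault(onset, []).append(index)
--
--     def lookup(target):
--         matched = []
--         for value in set(target):
--             matched.extend(positions.get(value, []))
--         matched.sort()
--         return matched
--
--     return (lookup(stable_odour_vis_1_onsets),
--             lookup(perfect_transition_vis_1_onsets),
--             lookup(imperfect_transition_vis_1_onsets),
--             lookup(stable_visual_vis_1_onsets))
-- ===== Notes on version B (the rewrite author's own statement) =====
-- stated objective: faster
-- what changed: Replaces A's scan of all_onsets with four per-element list-membership tests by an inverted index built once (onset value -> positions); each category list is answered by iterating its distinct values, concatenating their position lists and sorting, with no membership test against all_onsets at all.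
import Mathlib
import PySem

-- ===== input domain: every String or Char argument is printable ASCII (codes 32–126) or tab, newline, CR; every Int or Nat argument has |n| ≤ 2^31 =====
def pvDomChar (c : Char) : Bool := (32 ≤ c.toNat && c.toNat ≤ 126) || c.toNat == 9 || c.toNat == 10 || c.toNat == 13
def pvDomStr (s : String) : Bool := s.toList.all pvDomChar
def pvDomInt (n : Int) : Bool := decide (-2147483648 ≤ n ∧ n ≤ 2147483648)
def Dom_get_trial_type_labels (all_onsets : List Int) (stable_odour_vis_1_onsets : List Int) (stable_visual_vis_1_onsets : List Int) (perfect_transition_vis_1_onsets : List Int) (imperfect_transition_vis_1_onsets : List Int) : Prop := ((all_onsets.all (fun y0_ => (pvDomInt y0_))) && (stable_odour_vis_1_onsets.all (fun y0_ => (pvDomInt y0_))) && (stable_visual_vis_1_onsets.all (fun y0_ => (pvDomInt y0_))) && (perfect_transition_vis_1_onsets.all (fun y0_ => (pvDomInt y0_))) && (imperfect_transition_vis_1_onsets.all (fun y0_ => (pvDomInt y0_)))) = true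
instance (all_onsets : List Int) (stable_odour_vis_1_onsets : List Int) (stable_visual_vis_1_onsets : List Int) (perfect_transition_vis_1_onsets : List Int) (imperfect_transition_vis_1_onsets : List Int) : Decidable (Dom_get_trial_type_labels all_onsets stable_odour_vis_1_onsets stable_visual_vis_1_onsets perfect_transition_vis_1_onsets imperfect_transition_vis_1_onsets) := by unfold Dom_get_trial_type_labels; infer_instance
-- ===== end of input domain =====

-- B replaces A's per-onset membership scans by an inverted index (onset value -> positions)
-- built once; each category is answered by concatenating the position lists of its distinct
-- values and sorting (faster in a timing run).


-- ===== PORT A =====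
-- one loop over range(len(all_onsets)); state = the four index lists; the index is always in
-- range, so pyGetD with a dummy default is exact here
def get_trial_type_labels (all_onsets : List Int) (stable_odour_vis_1_onsets : List Int) (stable_visual_vis_1_onsets : List Int) (perfect_transition_vis_1_onsets : List Int) (imperfect_transition_vis_1_onsets : List Int) : List Int × List Int × List Int × List Int :=
  let number_of_onsets : Int := PySem.List.len all_onsets
  (PySem.List.pyRange 0 number_of_onsets 1).foldl
    (fun st onset_index =>
      let onset := PySem.List.pyGetD all_onsets onset_index 0
      (if onset ∈ stable_odour_vis_1_onsets then st.1 ++ [onset_index] else st.1,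
       if onset ∈ perfect_transition_vis_1_onsets then st.2.1 ++ [onset_index] else st.2.1,
       if onset ∈ imperfect_transition_vis_1_onsets then st.2.2.1 ++ [onset_index] else st.2.2.1,
       if onset ∈ stable_visual_vis_1_onsets then st.2.2.2 ++ [onset_index] else st.2.2.2))
    ([], [], [], [])

-- ===== PORT B =====
-- inverted index: positions.setdefault(onset, []).append(index) is d[onset] = d.get(onset, []) ++ [index]
def pvPositions (all_onsets : List Int) : PySem.Dict Int (List Int) :=
  (PySem.List.enumerate all_onsets).foldl
    (fun d p => d.modify p.2 [] (· ++ [p.1])) PySem.Dict.empty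

-- lookup(target): extend over the distinct values of target, then sort
def pvLookup (positions : PySem.Dict Int (List Int)) (target : List Int) : List Int :=
  let matched := (PySem.Set.ofList target).foldl (fun acc v => acc ++ positions.getD v []) []
  PySem.List.sorted matched (fun x => x) false

def get_trial_type_labels_alt (all_onsets : List Int) (stable_odour_vis_1_onsets : List Int) (stable_visual_vis_1_onsets : List Int) (perfect_transition_vis_1_onsets : List Int) (imperfect_transition_vis_1_onsets : List Int) : List Int × List Int × List Int × List Int :=
  let positions := pvPositions all_onsets
  (pvLookup positions stable_odour_vis_1_onsets,
   pvLookup positions perfect_transition_vis_1_onsets,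
   pvLookup positions imperfect_transition_vis_1_onsets,
   pvLookup positions stable_visual_vis_1_onsets)

-- ===== PRECONDITION & SPEC =====
def Spec_get_trial_type_labels (all_onsets : List Int) (stable_odour_vis_1_onsets : List Int) (stable_visual_vis_1_onsets : List Int) (perfect_transition_vis_1_onsets : List Int) (imperfect_transition_vis_1_onsets : List Int) (out : List Int × List Int × List Int × List Int) : Prop := out = get_trial_type_labels_alt all_onsets stable_odour_vis_1_onsets stable_visual_vis_1_onsets perfect_transition_vis_1_onsets imperfect_transition_vis_1_onsets
instance (all_onsets : List Int) (stable_odour_vis_1_onsets : List Int) (stable_visual_vis_1_onsets : List Int) (perfect_transition_vis_1_onsets : List Int) (imperfect_transition_vis_1_onsets : List Int) (out : List Int × List Int × List Int × List Int) : Decidable (Spec_get_trial_type_labels all_onsets stable_odour_vis_1_onsets stable_visual_vis_1_onsets perfect_transition_vis_1_onsets imperfect_transition_vis_1_onsets out) := by unfold Spec_get_trial_type_labels; infer_instance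

-- ===== CLAIM (what is proved, stated in full; the proofs are below) =====
def Claim_equal_get_trial_type_labels : Prop := ∀ (all_onsets : List Int) (stable_odour_vis_1_onsets : List Int) (stable_visual_vis_1_onsets : List Int) (perfect_transition_vis_1_onsets : List Int) (imperfect_transition_vis_1_onsets : List Int), Dom_get_trial_type_labels all_onsets stable_odour_vis_1_onsets stable_visual_vis_1_onsets perfect_transition_vis_1_onsets imperfect_transition_vis_1_onsets → Spec_get_trial_type_labels all_onsets stable_odour_vis_1_onsets stable_visual_vis_1_onsets perfect_transition_vis_1_onsets imperfect_transition_vis_1_onsets (get_trial_type_labels all_onsets stable_odour_vis_1_onsets stable_visual_vis_1_onsets perfect_transition_vis_1_onsets imperfect_transition_vis_1_onsets)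

-- ===== LEMMAS AND PROOFS =====

-- A's loop over enumerate xs s, with arbitrary accumulators, appends the matching indexes
lemma loopA_eq (xs : List (Int × Int)) (l1 l2 l3 l4 : List Int)
    (a b c d : List Int) :
    xs.foldl
      (fun (st : List Int × List Int × List Int × List Int) p =>
        (if p.2 ∈ l1 then st.1 ++ [p.1] else st.1,
         if p.2 ∈ l2 then st.2.1 ++ [p.1] else st.2.1,
         if p.2 ∈ l3 then st.2.2.1 ++ [p.1] else st.2.2.1,
         if p.2 ∈ l4 then st.2.2.2 ++ [p.1] else st.2.2.2)) (a, b, c, d)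
      = (a ++ (xs.filter (fun p => decide (p.2 ∈ l1))).map (·.1),
         b ++ (xs.filter (fun p => decide (p.2 ∈ l2))).map (·.1),
         c ++ (xs.filter (fun p => decide (p.2 ∈ l3))).map (·.1),
         d ++ (xs.filter (fun p => decide (p.2 ∈ l4))).map (·.1)) := by
  induction xs generalizing a b c d with
  | nil => simp
  | cons x t ih =>
    simp only [List.foldl_cons, List.filter_cons]
    rw [ih]
    split_ifs <;> simp_all

-- the inverted index at value v holds exactly the positions of v, in order
lemma pvPositions_getD (all_onsets : List Int) (v : Int) :
    (pvPositions all_onsets).getD v []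
      = ((PySem.List.enumerate all_onsets).filter (fun p => p.2 == v)).map (·.1) := by
  unfold pvPositions
  have h := PySem.Dict.getD_foldl_modify_append
    ((PySem.List.enumerate all_onsets).map Prod.swap) PySem.Dict.empty v
  rw [List.foldl_map] at h
  simpa [List.filter_map, List.map_map, Function.comp_def, Prod.swap] using h

-- over a duplicate-free value list, the one matching value contributes its singleton
lemma flatMap_ite_singleton (S : List Int) (hS : S.Nodup) (x y : Int) :
    S.flatMap (fun v => if x = v then [y] else []) = if x ∈ S then [y] else [] := by
  induction S with
  | nil => simp
  | cons v t ih =>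
    rcases List.nodup_cons.mp hS with ⟨hv, ht⟩
    by_cases hxv : x = v
    · subst hxv
      have : t.flatMap (fun v => if x = v then [y] else []) = [] := by
        apply List.flatMap_eq_nil_iff.mpr
        intro w hw
        simp [show x ≠ w from fun h => hv (h ▸ hw)]
      simp [this]
    · simp [hxv, ih ht]

-- grouping by distinct values is a permutation of the single filtered pass
lemma flatMap_groups_perm (L : List (Int × Int)) (S : List Int) (hS : S.Nodup) :
    (S.flatMap (fun v => (L.filter (fun p => p.2 == v)).map (·.1))).Perm
      ((L.filter (fun p => decide (p.2 ∈ S))).map (·.1)) := by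
  induction L with
  | nil => simp
  | cons q t ih =>
    have hsplit : (fun v : Int => ((q :: t).filter (fun p => p.2 == v)).map (·.1))
        = fun v => (if q.2 = v then [q.1] else [])
            ++ ((t.filter (fun p => p.2 == v)).map (·.1)) := by
      funext v
      by_cases h : q.2 = v <;> simp [h]
    rw [hsplit]
    refine (List.flatMap_append_perm S _ _).symm.trans ?_
    rw [flatMap_ite_singleton S hS q.2 q.1]
    by_cases hq : q.2 ∈ S
    · simpa [List.filter_cons, hq] using ih.cons q.1
    · simpa [List.filter_cons, hq] using ih

-- B's lookup over the inverted index is the ascending list of matching indexes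
lemma pvLookup_eq (all_onsets target : List Int) :
    pvLookup (pvPositions all_onsets) target
      = ((PySem.List.enumerate all_onsets).filter
            (fun p => decide (p.2 ∈ target))).map (·.1) := by
  unfold pvLookup
  rw [PySem.List.foldl_append_eq_flatMap]
  simp only [List.nil_append, pvPositions_getD]
  have hfil : (PySem.List.enumerate all_onsets).filter
        (fun p => decide (p.2 ∈ PySem.Set.ofList target))
      = (PySem.List.enumerate all_onsets).filter
        (fun p => decide (p.2 ∈ target)) :=
    List.filter_congr (fun p _ => by simp [PySem.Set.mem_ofList])
  have hmemb := congrArg (List.map (fun x : Int × Int => x.1)) hfil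
  apply PySem.List.sorted_eq_of_perm_of_pairwise_lt
  · rw [← hmemb]
    exact (flatMap_groups_perm (PySem.List.enumerate all_onsets)
      (PySem.Set.ofList target) (PySem.Set.nodup_ofList target)).symm
  · exact List.Pairwise.map _ (fun a b h => h)
      ((PySem.List.pairwise_lt_enumerate all_onsets 0).filter _)

-- ===== VERDICT (by name: the statement is the Claim_ definition above) =====
theorem get_trial_type_labels_spec : Claim_equal_get_trial_type_labels := by
  intro all so sv pt it _
  unfold Spec_get_trial_type_labels get_trial_type_labels get_trial_type_labels_alt
  have henum := PySem.List.enumerate_eq_map_pyRange (xs := all) (d := (0 : Int))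
  have hL :
      (PySem.List.enumerate all).foldl
        (fun (st : List Int × List Int × List Int × List Int) p =>
          (if p.2 ∈ so then st.1 ++ [p.1] else st.1,
           if p.2 ∈ pt then st.2.1 ++ [p.1] else st.2.1,
           if p.2 ∈ it then st.2.2.1 ++ [p.1] else st.2.2.1,
           if p.2 ∈ sv then st.2.2.2 ++ [p.1] else st.2.2.2)) ([], [], [], [])
      = (PySem.List.pyRange 0 (PySem.List.len all) 1).foldl
          (fun (st : List Int × List Int × List Int × List Int) onset_index =>
            let onset := PySem.List.pyGetD all onset_index 0
            (if onset ∈ so then st.1 ++ [onset_index] else st.1,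
             if onset ∈ pt then st.2.1 ++ [onset_index] else st.2.1,
             if onset ∈ it then st.2.2.1 ++ [onset_index] else st.2.2.1,
             if onset ∈ sv then st.2.2.2 ++ [onset_index] else st.2.2.2)) ([], [], [], []) := by
    rw [henum, List.foldl_map]
  dsimp only
  rw [← hL, loopA_eq, pvLookup_eq, pvLookup_eq, pvLookup_eq, pvLookup_eq]
  simp
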